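-- pv_equiv track=rewrite | github.com/Hedge-Lord/serverless-benchmarks | lambda-bc-opt/benchmark/lambda/check_redis_access.py | process_result_2
-- ===== SOURCE A (Python) =====
-- def process_result_2(result):
--     ans = {}
--     for x in result:
--         accessed_by = x[4]
--         access_type = x[3][0]
--         accessed_obj = x[3][1]
--         k = (accessed_by, access_type)
--         v = accessed_obj
--         if k not in ans:
--             ans[k] = []
--         ans[k].append(v)
--     return ans
-- ===== SOURCE B (Python) =====
-- def process_result_2(result):
--     keys = list(dict.fromkeys((x[4], x[3][0]) for x in result))
--     return {k: [x[3][1] for x in result if (x[4], x[3][0]) == k] for k in keys}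
-- ===== Notes on version B (the rewrite author's own statement) =====
-- stated objective: idiomatic
-- what changed: A builds the dict-of-lists incrementally with a membership test and append inside one loop; B first collects the distinct (accessor, access_type) keys in first-occurrence order via dict.fromkeys and then builds each group's value list with one filtering comprehension per key.
import Mathlib
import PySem

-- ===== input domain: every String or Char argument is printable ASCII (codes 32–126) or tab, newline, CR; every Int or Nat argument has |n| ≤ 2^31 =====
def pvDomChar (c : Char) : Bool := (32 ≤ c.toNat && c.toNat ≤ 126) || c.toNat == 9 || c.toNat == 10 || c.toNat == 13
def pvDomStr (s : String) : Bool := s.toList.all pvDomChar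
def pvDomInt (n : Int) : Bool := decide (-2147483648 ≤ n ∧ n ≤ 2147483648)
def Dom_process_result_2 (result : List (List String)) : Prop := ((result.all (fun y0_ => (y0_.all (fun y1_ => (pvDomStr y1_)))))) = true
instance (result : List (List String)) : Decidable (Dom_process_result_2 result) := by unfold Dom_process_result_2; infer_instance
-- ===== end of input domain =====

-- B replaces A's incremental dict-of-lists loop by an ordered key dedup (dict.fromkeys)
-- followed by one filtering comprehension per key (objective: simpler / idiomatic).
-- Python dicts are returned as List (String × String × List String) triples in insertion order.

-- ===== PORT A =====
def process_result_2 (result : List (List String)) : List (String × String × List String) :=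
  let ans := result.foldl
    (fun (ans : PySem.Dict (String × String) (List String)) x =>
      let accessed_by := (PySem.List.pyGet? x 4).getD ""
      let x3 := (PySem.List.pyGet? x 3).getD ""
      let access_type := String.singleton ((PySem.Str.pyGet? x3 0).getD ' ')
      let accessed_obj := String.singleton ((PySem.Str.pyGet? x3 1).getD ' ')
      let k := (accessed_by, access_type)
      let v := accessed_obj
      let ans := if ans.contains k then ans else ans.insert k []   -- if k not in ans: ans[k] = []
      ans.modify k [] (fun l => l ++ [v]))                         -- ans[k].append(v)
    PySem.Dict.empty
  ans.items.map (fun p => (p.1.1, p.1.2, p.2))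

-- ===== PORT B =====
-- (x[4], x[3][0])
def pr2AltKey (x : List String) : String × String :=
  ((PySem.List.pyGet? x 4).getD "",
   String.singleton ((PySem.Str.pyGet? ((PySem.List.pyGet? x 3).getD "") 0).getD ' '))

-- x[3][1]
def pr2AltVal (x : List String) : String :=
  String.singleton ((PySem.Str.pyGet? ((PySem.List.pyGet? x 3).getD "") 1).getD ' ')

def process_result_2_alt (result : List (List String)) : List (String × String × List String) :=
  let keys := PySem.List.dedup (result.map pr2AltKey)
  keys.map (fun k => (k.1, k.2, (result.filter (fun x => pr2AltKey x == k)).map pr2AltVal))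

-- ===== PRECONDITION & SPEC =====
-- Pre_ excludes exactly the rows on which Python A raises IndexError: a row shorter than 5
-- entries or whose 4th entry has fewer than 2 characters.
def Pre_process_result_2 (result : List (List String)) : Prop :=
  ∀ x ∈ result, 5 ≤ x.length ∧ 2 ≤ (x.getD 3 "").toList.length
instance (result : List (List String)) : Decidable (Pre_process_result_2 result) := by
  unfold Pre_process_result_2; infer_instance
def pvWitness_process_result_2 : List (List String) :=
  [["o1", "t", "f", "rw", "alice"], ["o2", "t", "f", "ra", "alice"], ["o3", "t", "f", "rb", "bob"]]

def Spec_process_result_2 (result : List (List String)) (out : List (String × String × List String)) : Prop := out = process_result_2_alt result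
instance (result : List (List String)) (out : List (String × String × List String)) : Decidable (Spec_process_result_2 result out) := by unfold Spec_process_result_2; infer_instance

-- ===== CLAIM (what is proved, stated in full; the proofs are below) =====
def Claim_equal_process_result_2 : Prop := ∀ (result : List (List String)), Dom_process_result_2 result → Pre_process_result_2 result → Spec_process_result_2 result (process_result_2 result)

-- ===== LEMMAS AND PROOFS =====

-- A's "ensure key then append" step is exactly Dict.modify with default [].
theorem pr2_step_eq {κ : Type} [BEq κ] [LawfulBEq κ]
    (d : PySem.Dict κ (List String)) (k : κ) (v : String) :
    (if d.contains k then d else d.insert k []).modify k [] (fun l => l ++ [v])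
      = d.modify k [] (fun l => l ++ [v]) := by
  by_cases h : d.contains k
  · simp [h]
  · have h' : d.contains k = false := by simpa using h
    rw [if_neg (by simp [h'])]
    simp only [PySem.Dict.modify, PySem.Dict.getD_insert_self,
      PySem.Dict.insert_insert_self,
      PySem.Dict.getD_of_not_contains d ([] : List String) h']

theorem pr2_foldl_eq (result : List (List String)) :
    (result.foldl
      (fun (ans : PySem.Dict (String × String) (List String)) x =>
        let accessed_by := (PySem.List.pyGet? x 4).getD ""
        let x3 := (PySem.List.pyGet? x 3).getD ""
        let access_type := String.singleton ((PySem.Str.pyGet? x3 0).getD ' ')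
        let accessed_obj := String.singleton ((PySem.Str.pyGet? x3 1).getD ' ')
        let k := (accessed_by, access_type)
        let v := accessed_obj
        let ans := if ans.contains k then ans else ans.insert k []
        ans.modify k [] (fun l => l ++ [v]))
      PySem.Dict.empty)
    = result.foldl
        (fun (d : PySem.Dict (String × String) (List String)) x =>
          d.modify (pr2AltKey x) [] (fun l => l ++ [pr2AltVal x]))
        PySem.Dict.empty := by
  congr 1
  funext d x
  simpa [pr2AltKey, pr2AltVal] using
    pr2_step_eq d (pr2AltKey x) (pr2AltVal x)

theorem pr2_getD (result : List (List String)) (k : String × String) :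
    (result.foldl
        (fun (d : PySem.Dict (String × String) (List String)) x =>
          d.modify (pr2AltKey x) [] (fun l => l ++ [pr2AltVal x]))
        PySem.Dict.empty).getD k []
      = (result.filter (fun x => pr2AltKey x == k)).map pr2AltVal := by
  have h := PySem.Dict.getD_foldl_modify_append
      (result.map (fun x => (pr2AltKey x, pr2AltVal x)))
      (PySem.Dict.empty (κ := String × String) (ν := List String)) k
  rw [List.foldl_map] at h
  simpa [List.filter_map, Function.comp, List.map_map] using h

-- ===== VERDICT (by name: the statement is the Claim_ definition above) =====
theorem process_result_2_spec : Claim_equal_process_result_2 := by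
  intro result _ _
  show process_result_2 result = process_result_2_alt result
  unfold process_result_2 process_result_2_alt
  simp only []
  rw [pr2_foldl_eq]
  set d := result.foldl
      (fun (d : PySem.Dict (String × String) (List String)) x =>
        d.modify (pr2AltKey x) [] (fun l => l ++ [pr2AltVal x]))
      PySem.Dict.empty with hd
  have hkeys : d.keys = PySem.List.dedup (result.map pr2AltKey) := by
    rw [hd, PySem.Dict.keys_foldl_modify_key result pr2AltKey []
      (fun _ x => (fun l => l ++ [pr2AltVal x])) PySem.Dict.empty]
    simp [PySem.Set.update_nil_left, PySem.List.dedup_eq_ofList, PySem.Dict.keys_empty]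
  have hnd : d.keys.Nodup := by
    rw [hd]
    exact PySem.Dict.nodup_keys_foldl_modify_key result pr2AltKey []
      (fun _ x => (fun l => l ++ [pr2AltVal x])) PySem.Dict.empty (by simp)
  rw [PySem.Dict.items_eq_map_keys d hnd [], hkeys, List.map_map]
  refine List.map_congr_left (fun k _ => ?_)
  simp [pr2_getD result k, hd]
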